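-- pv_equiv track=rewrite | github.com/liamcal/aoc | 23/07/solver.py | has_n_of_a_kind
-- ===== SOURCE A (Python) =====
-- def has_n_of_a_kind(hand_string: str, n: int, check_js=True, exclude=None):
--     if exclude is None:
--         exclude = set()
--     success = False
--     matches = 0
--     counted = set()
--     for c in hand_string:
--         if c not in exclude and (hand_string.count(c) + (hand_string.count('J') if check_js and c != 'J' else 0)) == n and c not in counted:
--             counted.add(c)
--             matches += 1
--             success = True
--     if n == 2 and 'J' in hand_string:
--         matches = 1
--     # The bug is here, matches is too high if there's a J
--     return success, matches, counted
-- ===== SOURCE B (Python) =====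
-- def has_n_of_a_kind(hand_string: str, n: int, check_js=True, exclude=None):
--     excluded = exclude if exclude is not None else set()
--     jokers = hand_string.count('J') if check_js else 0
--
--     def runs(s):
--         # recursive partition: take the first char, strip ALL its occurrences,
--         # recurse on the remainder -> (char, multiplicity) in first-occurrence order
--         if not s:
--             return []
--         c = s[0]
--         rest = [x for x in s if x != c]
--         return [(c, len(s) - len(rest))] + runs(rest)
--
--     counted = {c for c, k in runs(hand_string)
--                if c not in excluded and k + (jokers if c != 'J' else 0) == n}
--     matches = 1 if n == 2 and 'J' in hand_string else len(counted)
--     return bool(counted), matches, counted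
-- ===== Notes on version B (the rewrite author's own statement) =====
-- stated objective: alternative
-- what changed: B computes (char, multiplicity) runs by a recursive partition (strip all occurrences of the first character and recurse on the remainder), then filters those runs once, instead of A's iterative per-position loop that rescans the whole hand with str.count at every position and deduplicates with a seen-set.
import Mathlib
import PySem

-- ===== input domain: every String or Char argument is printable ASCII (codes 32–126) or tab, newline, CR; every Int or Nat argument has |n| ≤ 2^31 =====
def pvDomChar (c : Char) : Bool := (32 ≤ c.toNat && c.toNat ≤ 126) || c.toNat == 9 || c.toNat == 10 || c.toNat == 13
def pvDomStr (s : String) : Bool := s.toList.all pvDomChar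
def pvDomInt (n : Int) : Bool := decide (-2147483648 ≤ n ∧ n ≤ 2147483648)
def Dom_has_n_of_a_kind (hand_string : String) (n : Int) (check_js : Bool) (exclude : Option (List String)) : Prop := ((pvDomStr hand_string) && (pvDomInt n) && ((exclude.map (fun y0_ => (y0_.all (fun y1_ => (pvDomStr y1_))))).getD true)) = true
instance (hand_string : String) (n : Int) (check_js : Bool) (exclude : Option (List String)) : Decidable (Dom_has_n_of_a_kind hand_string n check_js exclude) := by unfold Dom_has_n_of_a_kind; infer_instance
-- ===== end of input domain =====

-- B replaces A's per-position loop with str.count rescans by a recursive partition into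
-- (char, multiplicity) runs, filtered once — objective: alternative decomposition.
-- Return-value equivalence only; neither version mutates its arguments.

-- ===== PORT A =====
-- hand_string.count(c) for a single character c is ported as cs.count c (exact for 1-char needles).
def has_n_of_a_kind (hand_string : String) (n : Int) (check_js : Bool) (exclude : Option (List String)) : Bool × Int × List String :=
  let excl : List String := exclude.getD []        -- 'if exclude is None: exclude = set()'
  let cs := hand_string.toList
  let st := cs.foldl
    (fun (st : Bool × Int × PySem.Set String) c =>
      if !(excl.contains (String.ofList [c])) &&
         (((cs.count c : Int) + (if check_js && !(c == 'J') then (cs.count 'J' : Int) else 0)) == n) &&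
         !(PySem.Set.contains st.2.2 (String.ofList [c]))
      then (true, st.2.1 + 1, PySem.Set.add st.2.2 (String.ofList [c]))
      else st)
    (false, 0, PySem.Set.empty)
  let matches_ : Int := if n == 2 && cs.contains 'J' then 1 else st.2.1
  (st.1, matches_, st.2.2)

-- ===== PORT B =====
-- Source B's recursive helper runs(s): first char, strip all its occurrences, recurse.
def pvRunsB : List Char → List (Char × Int)
  | [] => []
  | c :: t =>
    let rest := (c :: t).filter (fun x => !(x == c))
    (c, ((c :: t).length : Int) - (rest.length : Int)) :: pvRunsB rest
termination_by l => l.length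
decreasing_by
  simp only [List.filter_cons, beq_self_eq_true, Bool.not_true, List.length_cons]
  exact Nat.lt_succ_of_le (List.length_filter_le _ _)

-- Source B's set comprehension over runs: run characters are distinct, so the filtered/mapped
-- list is duplicate-free and is the resulting PySem.Set.
def has_n_of_a_kind_alt (hand_string : String) (n : Int) (check_js : Bool) (exclude : Option (List String)) : Bool × Int × List String :=
  let excluded : List String := exclude.getD []
  let cs := hand_string.toList
  let jokers : Int := if check_js then (cs.count 'J' : Int) else 0
  let counted : PySem.Set String :=
    ((pvRunsB cs).filter (fun p =>
        !(excluded.contains (String.ofList [p.1])) &&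
        ((p.2 + (if !(p.1 == 'J') then jokers else 0)) == n))).map
      (fun p => String.ofList [p.1])
  let matches_ : Int := if n == 2 && cs.contains 'J' then 1 else (counted.length : Int)
  (!counted.isEmpty, matches_, counted)

-- ===== PRECONDITION & SPEC =====
def Spec_has_n_of_a_kind (hand_string : String) (n : Int) (check_js : Bool) (exclude : Option (List String)) (out : Bool × Int × List String) : Prop := out = has_n_of_a_kind_alt hand_string n check_js exclude
instance (hand_string : String) (n : Int) (check_js : Bool) (exclude : Option (List String)) (out : Bool × Int × List String) : Decidable (Spec_has_n_of_a_kind hand_string n check_js exclude out) := by unfold Spec_has_n_of_a_kind; infer_instance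

-- ===== CLAIM (what is proved, stated in full; the proofs are below) =====
def Claim_equal_has_n_of_a_kind : Prop := ∀ (hand_string : String) (n : Int) (check_js : Bool) (exclude : Option (List String)), Dom_has_n_of_a_kind hand_string n check_js exclude → Spec_has_n_of_a_kind hand_string n check_js exclude (has_n_of_a_kind hand_string n check_js exclude)

-- ===== LEMMAS AND PROOFS =====

-- state of A's loop as a function of the set of characters seen so far
def pvG (P : Char → Bool) (s : List Char) : Bool × Int × List String :=
  (!((s.filter P).isEmpty), ((s.filter P).length : Int), (s.filter P).map (fun c => String.ofList [c]))

theorem pvMk_inj {c d : Char} (h : String.ofList [c] = String.ofList [d]) : c = d := by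
  have := congrArg String.toList h
  simpa using this

theorem pvFoldA_eq (P : Char → Bool) (l : List Char) (s : List Char) :
    l.foldl
      (fun (st : Bool × Int × PySem.Set String) c =>
        if P c && !(PySem.Set.contains st.2.2 (String.ofList [c]))
        then (true, st.2.1 + 1, PySem.Set.add st.2.2 (String.ofList [c]))
        else st)
      (pvG P s)
    = pvG P (l.foldl PySem.Set.add s) := by
  induction l generalizing s with
  | nil => rfl
  | cons c l ih =>
    have hstep :
        (if P c && !(PySem.Set.contains (pvG P s).2.2 (String.ofList [c]))
         then (true, (pvG P s).2.1 + 1, PySem.Set.add (pvG P s).2.2 (String.ofList [c]))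
         else (pvG P s))
        = pvG P (PySem.Set.add s c) := by
      by_cases hc : c ∈ s
      · have hadd : PySem.Set.add s c = s := by
          simp [PySem.Set.add, PySem.Set.contains, hc]
        rw [hadd]
        by_cases hp : P c = true
        · have hmem : String.ofList [c] ∈ (s.filter P).map (fun c => String.ofList [c]) :=
            List.mem_map_of_mem (List.mem_filter.mpr ⟨hc, hp⟩)
          simp [pvG, PySem.Set.contains, hmem]
        · simp [pvG, hp]
      · have hadd : PySem.Set.add s c = s ++ [c] := by
          simp [PySem.Set.add, PySem.Set.contains, hc]
        have hnot : String.ofList [c] ∉ (s.filter P).map (fun c => String.ofList [c]) := by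
          intro h
          rcases List.mem_map.mp h with ⟨d, hd, hmk⟩
          exact hc (List.mem_of_mem_filter (pvMk_inj hmk.symm ▸ hd))
        by_cases hp : P c = true
        · have : PySem.Set.add ((s.filter P).map (fun c => String.ofList [c])) (String.ofList [c])
              = (s.filter P).map (fun c => String.ofList [c]) ++ [String.ofList [c]] := by
            simp [PySem.Set.add, PySem.Set.contains, hnot]
          simp [pvG, hadd, hp, PySem.Set.contains, hnot, List.filter_append]
        · simp [pvG, hadd, hp, List.filter_append]
    rw [List.foldl_cons, hstep, List.foldl_cons, ih]

-- filtering out an already-seen character does not change a Set.add fold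
theorem pvFoldAdd_filter (c : Char) (l : List Char) (s : List Char) (hc : c ∈ s) :
    l.foldl PySem.Set.add s = (l.filter (fun x => !(x == c))).foldl PySem.Set.add s := by
  induction l generalizing s with
  | nil => rfl
  | cons x l ih =>
    by_cases hx : x = c
    · subst hx
      have : PySem.Set.add s x = s := by simp [PySem.Set.add, PySem.Set.contains, hc]
      simp [List.filter_cons, this, ih s hc]
    · have hmem : c ∈ PySem.Set.add s x := by
        simp [PySem.Set.add, PySem.Set.contains]; split <;> simp [hc]
      simp [List.filter_cons, hx, ih _ hmem]

-- a fresh head of the accumulator survives a Set.add fold over elements ≠ c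
theorem pvFoldAdd_cons (c : Char) (l : List Char) (s : List Char) (hc : c ∉ l) :
    l.foldl PySem.Set.add (c :: s) = c :: l.foldl PySem.Set.add s := by
  induction l generalizing s with
  | nil => rfl
  | cons x l ih =>
    have hx : x ≠ c := fun h => hc (h ▸ List.mem_cons_self)
    have hstep : PySem.Set.add (c :: s) x = c :: PySem.Set.add s x := by
      simp [PySem.Set.add, PySem.Set.contains, hx]
      split <;> simp
    rw [List.foldl_cons, hstep, List.foldl_cons, ih _ (fun h => hc (List.mem_cons_of_mem _ h))]

theorem pvOfList_cons (c : Char) (t : List Char) :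
    PySem.Set.ofList (c :: t) = c :: PySem.Set.ofList (t.filter (fun x => !(x == c))) := by
  have h1 : PySem.Set.ofList (c :: t) = t.foldl PySem.Set.add [c] := by
    simp [PySem.Set.ofList_eq_foldl, PySem.Set.add, PySem.Set.contains, PySem.Set.empty]
  have hc : c ∉ t.filter (fun x => !(x == c)) := by
    intro h
    simpa using (List.mem_filter.mp h).2
  rw [h1, pvFoldAdd_filter c t [c] (by simp),
      pvFoldAdd_cons c _ [] hc, PySem.Set.ofList_eq_foldl]

-- the two filters of a list split its length
theorem pvFilterSplit (p : Char → Bool) (t : List Char) :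
    (t.filter p).length + (t.filter (fun x => !p x)).length = t.length := by
  induction t with
  | nil => rfl
  | cons x t ih => by_cases h : p x <;> simp [List.filter_cons, h] <;> omega

-- the runs helper returns exactly the distinct characters with their multiplicities
theorem pvRunsB_eq (l : List Char) :
    pvRunsB l = (PySem.Set.ofList l).map (fun c => (c, (l.count c : Int))) := by
  induction l using pvRunsB.induct with
  | case1 => simp [pvRunsB]
  | case2 c t rest ih =>
    have hrest : rest = t.filter (fun x => !(x == c)) := by
      simp [rest, List.filter_cons]
    have hcount : ((c :: t).length : Int) - (rest.length : Int) = ((c :: t).count c : Int) := by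
      have h0 := pvFilterSplit (fun x => x == c) t
      have h1 : t.count c = (t.filter (fun x => x == c)).length := by
        rw [List.count, List.countP_eq_length_filter]
      have h2 : (c :: t).count c = t.count c + 1 := by
        simp [List.count_cons]
      rw [hrest] at *
      simp only [List.length_cons, h2, h1]
      omega
    rw [pvRunsB]
    rw [pvOfList_cons, List.map_cons, ← hrest]
    refine congrArg₂ _ (by rw [hcount]) ?_
    rw [ih]
    apply List.map_congr_left
    intro d hd
    have hd' : d ∈ rest := (PySem.Set.mem_ofList _ _).mp hd
    have hdc : d ≠ c := by
      intro h; subst h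
      rw [hrest] at hd'
      simpa using (List.mem_filter.mp hd').2
    have hcd : rest.count d = (c :: t).count d := by
      rw [hrest, List.count_filter (by simp [hdc])]
      simp [List.count_cons, Ne.symm hdc]
    rw [hcd]

-- ===== VERDICT (by name: the statement is the Claim_ definition above) =====
theorem has_n_of_a_kind_spec : Claim_equal_has_n_of_a_kind := by
  intro hand_string n check_js exclude _
  unfold Spec_has_n_of_a_kind has_n_of_a_kind has_n_of_a_kind_alt
  set excl : List String := exclude.getD [] with hexcl
  set cs := hand_string.toList with hcs
  -- the per-character condition of A's loop
  set P : Char → Bool := fun c =>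
    !(excl.contains (String.ofList [c])) &&
    (((cs.count c : Int) + (if check_js && !(c == 'J') then (cs.count 'J' : Int) else 0)) == n)
    with hP
  have hfun :
      (fun (st : Bool × Int × PySem.Set String) c =>
        if !(excl.contains (String.ofList [c])) &&
           (((cs.count c : Int) + (if check_js && !(c == 'J') then (cs.count 'J' : Int) else 0)) == n) &&
           !(PySem.Set.contains st.2.2 (String.ofList [c]))
        then (true, st.2.1 + 1, PySem.Set.add st.2.2 (String.ofList [c]))
        else st)
      = (fun (st : Bool × Int × PySem.Set String) c =>
        if P c && !(PySem.Set.contains st.2.2 (String.ofList [c]))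
        then (true, st.2.1 + 1, PySem.Set.add st.2.2 (String.ofList [c]))
        else st) := by
    funext st c
    simp [hP, Bool.and_assoc]
  have hinit : ((false, 0, PySem.Set.empty) : Bool × Int × List String) = pvG P [] := by
    simp [pvG, PySem.Set.empty]
  have hA := pvFoldA_eq P cs []
  dsimp only
  rw [hfun, hinit, hA]
  have hofList : cs.foldl PySem.Set.add [] = PySem.Set.ofList cs :=
    (PySem.Set.ofList_eq_foldl cs).symm
  rw [hofList]
  -- B's filtered runs as a filter of the distinct characters
  have hBfilter :
      ((pvRunsB cs).filter (fun p =>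
          !(excl.contains (String.ofList [p.1])) &&
          ((p.2 + (if !(p.1 == 'J') then (if check_js then (cs.count 'J' : Int) else 0) else 0)) == n))).map
        (fun p => String.ofList [p.1])
      = ((PySem.Set.ofList cs).filter P).map (fun c => String.ofList [c]) := by
    rw [pvRunsB_eq, List.filter_map, List.map_map]
    congr 1
    apply List.filter_congr
    intro c _
    simp only [Function.comp, hP]
    cases hj : (c == 'J') <;> cases check_js <;> simp
  rw [hBfilter]
  simp [pvG]
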